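-- pv_equiv track=rewrite | github.com/Johnberman-J/python_prac | Done/Q51.py | solution
-- ===== SOURCE A (Python) =====
-- def solution(n, arr1, arr2):
--     answer = []
--
--     for i in range(n):
--         decoded1 = decoder(n, arr1[i])
--         decoded2 = decoder(n, arr2[i])
--         temp_arr = []
--         for j in range(len(decoded1)):
--             if decoded1[j] == "0" and decoded2[j] == "0":
--                 temp_arr.append(" ")
--             else:
--                 temp_arr.append("#")
--         answer.append("".join(temp_arr))
--
--     return answer
--
-- def decoder(digit, number):
--     decoded_arr = list(str(bin(number)[2:]))
--     length_difference = digit - len(decoded_arr)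
--
--     for i in range(length_difference):
--         decoded_arr.insert(i,"0")
--
--     return decoded_arr
-- ===== SOURCE B (Python) =====
-- def solution(n, arr1, arr2):
--     grid = []
--     for i in range(n):
--         row1 = bin(arr1[i])[2:].rjust(n, '0')
--         row2 = bin(arr2[i])[2:].rjust(n, '0')
--         blanks = {j for j, c in enumerate(row1) if c == '0'} & {j for j, c in enumerate(row2) if c == '0'}
--         grid.append(''.join(' ' if j in blanks else '#' for j in range(len(row1))))
--     return grid
-- ===== Notes on version B (the rewrite author's own statement) =====
-- stated objective: alternative
-- what changed: A decodes each row's two numbers into character lists padded by repeated list.insert and builds the row with an explicit index loop comparing characters pairwise; B pads with rjust, computes the set of zero positions of each decoding and intersects them, rendering the row from that set. …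
-- outside the precondition, e.g. on solution(1, [7], [-1]): A returns ['###'], B returns ['###']; on solution(1, [2], [1]): A raises IndexError, B returns ['##']
import Mathlib
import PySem

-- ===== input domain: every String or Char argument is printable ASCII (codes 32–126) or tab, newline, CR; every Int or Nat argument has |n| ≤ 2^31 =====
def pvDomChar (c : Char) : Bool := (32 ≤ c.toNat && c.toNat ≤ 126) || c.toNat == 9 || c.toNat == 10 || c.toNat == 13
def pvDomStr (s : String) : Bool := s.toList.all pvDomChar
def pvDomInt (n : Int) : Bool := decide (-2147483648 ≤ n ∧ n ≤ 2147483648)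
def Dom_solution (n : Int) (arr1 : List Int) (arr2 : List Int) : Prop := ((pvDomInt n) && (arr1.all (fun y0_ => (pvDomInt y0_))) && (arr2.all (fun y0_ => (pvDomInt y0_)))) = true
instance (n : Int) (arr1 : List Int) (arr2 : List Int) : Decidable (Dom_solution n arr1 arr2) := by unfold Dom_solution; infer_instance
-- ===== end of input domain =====

-- B replaces A's insert-padding and per-index character comparison by rjust padding and an
-- intersection of the two decodings' zero-position sets; equal return values on Pre_solution.

-- ===== PORT A =====
-- bin(m)[2:] for m ≥ 1, built digit by digit exactly as Python's bin produces it
-- (both ports call Python's builtin bin; this helper and binTail are its shared port)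
def natBinCore (m : Nat) : List Char :=
  if _h : m = 0 then []
  else natBinCore (m / 2) ++ [if m % 2 = 1 then '1' else '0']
  termination_by m
  decreasing_by exact Nat.div_lt_self (Nat.pos_of_ne_zero _h) one_lt_two

-- bin(number)[2:] : for negative x Python's slice keeps 'b' ('-0b101'[2:] = 'b101')
def binTail (x : Int) : List Char :=
  if x = 0 then ['0'] else if x < 0 then 'b' :: natBinCore x.natAbs else natBinCore x.natAbs

def decoder (digit : Int) (number : Int) : List Char :=
  let decoded := binTail number
  let diff := digit - (decoded.length : Int)
  (PySem.List.pyRange 0 diff 1).foldl (fun l i => PySem.List.insert l i '0') decoded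

def solution (n : Int) (arr1 : List Int) (arr2 : List Int) : List String :=
  (PySem.List.pyRange 0 n 1).foldl (fun answer i =>
    let decoded1 := decoder n (PySem.List.pyGetD arr1 i 0)
    let decoded2 := decoder n (PySem.List.pyGetD arr2 i 0)
    let temp := (PySem.List.pyRange 0 (decoded1.length : Int) 1).foldl (fun t j =>
      if PySem.List.pyGetD decoded1 j ' ' = '0' ∧ PySem.List.pyGetD decoded2 j '#' = '0'
      then t ++ [' '] else t ++ ['#']) []
    answer ++ [String.ofList temp]) []

-- ===== PORT B =====
-- str.rjust(w, '0'): left-pad with '0' to width w (unchanged when already that long)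
def rjust (w : Nat) (l : List Char) : List Char := List.replicate (w - l.length) '0' ++ l

-- {j for j, c in enumerate(row) if c == '0'}
def zeroPos (row : List Char) : PySem.Set Int :=
  PySem.Set.ofList (((PySem.List.enumerate row 0).filter (fun p => p.2 == '0')).map (fun p => p.1))

def solution_alt (n : Int) (arr1 : List Int) (arr2 : List Int) : List String :=
  (PySem.List.pyRange 0 n 1).foldl (fun grid i =>
    let row1 := rjust n.toNat (binTail (PySem.List.pyGetD arr1 i 0))
    let row2 := rjust n.toNat (binTail (PySem.List.pyGetD arr2 i 0))
    let blanks := PySem.Set.inter (zeroPos row1) (zeroPos row2)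
    grid ++ [String.ofList ((PySem.List.pyRange 0 ((row1.length : Nat) : Int) 1).map
      (fun j => if PySem.Set.contains blanks j then ' ' else '#'))]) []

-- ===== PRECONDITION & SPEC =====
-- length of bin(x)[2:] (bounds on the input, independent of either port)
def pyBitLen (x : Int) : Nat :=
  if x = 0 then 1 else if x < 0 then PySem.Int.bitLength x + 1 else PySem.Int.bitLength x

-- Pre_ requires n within both list lengths and, per row, the first decoding no longer than the
-- second: outside that A raises IndexError at the first overhanging '0' character, except when
-- every overhanging character is nonzero, where both programs return the same all-'#' overhang
-- (excluded only because that case's arithmetic characterization is bit-level, not because the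
-- values differ).
def Pre_solution (n : Int) (arr1 : List Int) (arr2 : List Int) : Prop :=
  n ≤ (arr1.length : Int) ∧ n ≤ (arr2.length : Int) ∧
  ∀ p ∈ List.zip (arr1.take n.toNat) (arr2.take n.toNat),
    pyBitLen p.1 ≤ max n.toNat (pyBitLen p.2)
instance (n : Int) (arr1 : List Int) (arr2 : List Int) : Decidable (Pre_solution n arr1 arr2) := by
  unfold Pre_solution; infer_instance

def pvWitness_solution : Int × List Int × List Int := (2, [1, 2], [2, 1])

def Spec_solution (n : Int) (arr1 : List Int) (arr2 : List Int) (out : List String) : Prop := out = solution_alt n arr1 arr2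
instance (n : Int) (arr1 : List Int) (arr2 : List Int) (out : List String) : Decidable (Spec_solution n arr1 arr2 out) := by unfold Spec_solution; infer_instance

-- ===== CLAIM (what is proved, stated in full; the proofs are below) =====
def Claim_equal_solution : Prop := ∀ (n : Int) (arr1 : List Int) (arr2 : List Int), Dom_solution n arr1 arr2 → Pre_solution n arr1 arr2 → Spec_solution n arr1 arr2 (solution n arr1 arr2)

-- ===== LEMMAS AND PROOFS =====

theorem length_natBinCore (m : Nat) : (natBinCore m).length = PySem.Int.bitLength (m : Int) := by
  induction m using Nat.strong_induction_on with
  | _ m ih =>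
    by_cases hm : m = 0
    · subst hm; simp [natBinCore, PySem.Int.bitLength_zero]
    · rw [natBinCore, dif_neg hm, PySem.Int.bitLength_natCast (Nat.pos_of_ne_zero hm)]
      simp [ih (m / 2) (Nat.div_lt_self (Nat.pos_of_ne_zero hm) one_lt_two)]

theorem length_binTail (x : Int) : (binTail x).length = pyBitLen x := by
  rw [binTail, pyBitLen]
  by_cases hx : x = 0
  · simp [hx]
  · rw [if_neg hx, if_neg hx]
    by_cases hneg : x < 0
    · rw [if_pos hneg, if_pos hneg]
      have h1 : x.natAbs = (-x).toNat := by omega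
      have h2 : ((-x).toNat : Int) = -x := by omega
      simp only [List.length_cons, length_natBinCore, h1, h2, PySem.Int.bitLength_neg]
    · rw [if_neg hneg, if_neg hneg]
      have h2 : (x.natAbs : Int) = x := by omega
      rw [length_natBinCore, h2]

theorem insert_fold (d : Nat) (l : List Char) :
    (PySem.List.pyRange 0 (d : Int) 1).foldl (fun l i => PySem.List.insert l i '0') l =
      List.replicate d '0' ++ l := by
  induction d with
  | zero => simp [PySem.List.pyRange_one_eq_nil]
  | succ d ih =>
    rw [show ((d + 1 : Nat) : Int) = (d : Int) + 1 by push_cast; ring]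
    rw [PySem.List.pyRange_one_succ_right (by positivity), List.foldl_append, ih]
    simp only [List.foldl_cons, List.foldl_nil]
    rw [PySem.List.insert_natCast _ d '0' (by simp)]
    have h1 : List.take d (List.replicate d '0' ++ l) = List.replicate d '0' := by
      rw [List.take_append_of_le_length (by simp)]; simp
    have h2 : List.drop d (List.replicate d '0' ++ l) = l := by
      rw [List.drop_append_of_le_length (by simp)]; simp
    rw [h1, h2, List.replicate_succ']
    simp

-- A's insert-padding of the decoding equals B's rjust of the same decoding
theorem decoder_eq_rjust (n : Int) (x : Int) (hn : 0 ≤ n) :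
    decoder n x = rjust n.toNat (binTail x) := by
  show (PySem.List.pyRange 0 (n - ((binTail x).length : Int)) 1).foldl _ _ = _
  rw [rjust]
  by_cases hle : n - ((binTail x).length : Int) ≤ 0
  · rw [PySem.List.pyRange_one_eq_nil hle, List.foldl_nil,
      show n.toNat - (binTail x).length = 0 by omega]
    simp
  · rw [show n - ((binTail x).length : Int) = ((n.toNat - (binTail x).length : Nat) : Int) by omega,
      insert_fold]

theorem length_rjust (w : Nat) (l : List Char) : (rjust w l).length = max w l.length := by
  simp [rjust]; omega

-- membership in the zero-position set
theorem mem_zeroPos (row : List Char) (j : Int) :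
    j ∈ zeroPos row ↔ ∃ (k : Nat) (_ : k < row.length), row[k] = '0' ∧ j = (k : Int) := by
  rw [zeroPos, PySem.Set.mem_ofList]
  constructor
  · intro h
    obtain ⟨p, hp, hj⟩ := List.mem_map.1 h
    obtain ⟨hpm, hp0⟩ := List.mem_filter.1 hp
    obtain ⟨k, hk, hpk⟩ := (PySem.List.mem_enumerate_iff _ _ _).1 hpm
    subst hpk
    exact ⟨k, hk, by simpa using hp0, by simpa using hj.symm⟩
  · rintro ⟨k, hk, h0, hj⟩
    apply List.mem_map.2
    refine ⟨((k : Int), row[k]), List.mem_filter.2 ⟨?_, by simp [h0]⟩, by simp [hj]⟩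
    exact (PySem.List.mem_enumerate_iff _ _ _).2 ⟨k, hk, by simp⟩

theorem zeroPos_spec (row : List Char) (k : Nat) (hk : k < row.length) :
    ((k : Int) ∈ zeroPos row ↔ row[k] = '0') := by
  rw [mem_zeroPos]
  constructor
  · rintro ⟨k', hk', h0, hj⟩
    have : k' = k := by omega
    subst this; exact h0
  · intro h0; exact ⟨k, hk, h0, rfl⟩

-- the per-row loop body of A, as a thunk on the index
theorem inner_if_eq (d1 d2 : List Char) :
    (fun (t : List Char) (j : Int) =>
        if PySem.List.pyGetD d1 j ' ' = '0' ∧ PySem.List.pyGetD d2 j '#' = '0'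
        then t ++ [' '] else t ++ ['#']) =
      fun t j => t ++ [if PySem.List.pyGetD d1 j ' ' = '0' ∧ PySem.List.pyGetD d2 j '#' = '0'
                        then ' ' else '#'] := by
  funext t j
  split <;> rfl

-- one row: A's index loop over the two decodings = B's rendering of the zero-set intersection
theorem row_eq (row1 row2 : List Char) (hlen : row1.length ≤ row2.length) :
    (PySem.List.pyRange 0 ((row1.length : Nat) : Int) 1).foldl
        (fun t j => if PySem.List.pyGetD row1 j ' ' = '0' ∧
                        PySem.List.pyGetD row2 j '#' = '0'
                    then t ++ [' '] else t ++ ['#']) [] =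
      (PySem.List.pyRange 0 ((row1.length : Nat) : Int) 1).map
        (fun j => if PySem.Set.contains (PySem.Set.inter (zeroPos row1) (zeroPos row2)) j
                  then ' ' else '#') := by
  rw [inner_if_eq, PySem.List.foldl_append_singleton_eq_map, List.nil_append]
  apply List.map_congr_left
  intro j hj
  rw [PySem.List.mem_pyRange_one] at hj
  obtain ⟨hj0, hjl⟩ := hj
  have hk1 : j.toNat < row1.length := by omega
  have hk2 : j.toNat < row2.length := by omega
  rw [PySem.List.pyGetD_eq_getElem _ _ hj0 (by omega), PySem.List.pyGetD_eq_getElem _ _ hj0 (by omega)]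
  have hjk : j = ((j.toNat : Nat) : Int) := by omega
  have hcont : PySem.Set.contains (PySem.Set.inter (zeroPos row1) (zeroPos row2)) j = true ↔
      (row1[j.toNat] = '0' ∧ row2[j.toNat] = '0') := by
    rw [PySem.Set.contains_iff, PySem.Set.mem_inter]
    conv_lhs => rw [hjk]
    rw [zeroPos_spec row1 j.toNat hk1, zeroPos_spec row2 j.toNat hk2]
  by_cases hc : row1[j.toNat] = '0' ∧ row2[j.toNat] = '0'
  · rw [if_pos hc, if_pos (hcont.2 hc)]
  · rw [if_neg hc, if_neg (fun h => hc (hcont.1 h))]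

theorem solution_eq_main (n : Int) (arr1 arr2 : List Int) (hpre : Pre_solution n arr1 arr2) :
    solution n arr1 arr2 = solution_alt n arr1 arr2 := by
  obtain ⟨hl1, hl2, hrow⟩ := hpre
  by_cases hn0 : n ≤ 0
  · unfold solution solution_alt
    rw [PySem.List.pyRange_one_eq_nil (by omega)]
    rfl
  have hn : 0 ≤ n := by omega
  unfold solution solution_alt
  rw [PySem.List.foldl_append_singleton_eq_map, PySem.List.foldl_append_singleton_eq_map,
    List.nil_append, List.nil_append]
  apply List.map_congr_left
  intro i hi
  rw [PySem.List.mem_pyRange_one] at hi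
  obtain ⟨hi0, hin⟩ := hi
  have hklt : i.toNat < n.toNat := by omega
  have hia : i.toNat < arr1.length := by omega
  have hib : i.toNat < arr2.length := by omega
  have hget1 : PySem.List.pyGetD arr1 i 0 = arr1[i.toNat] :=
    PySem.List.pyGetD_eq_getElem _ _ hi0 (by omega)
  have hget2 : PySem.List.pyGetD arr2 i 0 = arr2[i.toNat] :=
    PySem.List.pyGetD_eq_getElem _ _ hi0 (by omega)
  -- the per-row length bound from Pre_
  have hz : (arr1[i.toNat], arr2[i.toNat]) ∈ List.zip (arr1.take n.toNat) (arr2.take n.toNat) := by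
    have hlt : i.toNat < (List.zip (arr1.take n.toNat) (arr2.take n.toNat)).length := by
      simp [List.length_zip, List.length_take]; omega
    have := List.getElem_mem hlt
    rwa [List.getElem_zip, List.getElem_take, List.getElem_take] at this
  have hbl : pyBitLen arr1[i.toNat] ≤ max n.toNat (pyBitLen arr2[i.toNat]) := by
    simpa using hrow _ hz
  simp only [hget1, hget2]
  have hd1 : decoder n arr1[i.toNat] = rjust n.toNat (binTail arr1[i.toNat]) :=
    decoder_eq_rjust n _ hn
  have hd2 : decoder n arr2[i.toNat] = rjust n.toNat (binTail arr2[i.toNat]) :=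
    decoder_eq_rjust n _ hn
  have hlen : (rjust n.toNat (binTail arr1[i.toNat])).length ≤
      (rjust n.toNat (binTail arr2[i.toNat])).length := by
    rw [length_rjust, length_rjust, length_binTail, length_binTail]
    omega
  simp only [hd1, hd2]
  congr 1
  exact row_eq _ _ hlen

-- ===== VERDICT (by name: the statement is the Claim_ definition above) =====
theorem solution_spec : Claim_equal_solution := by
  intro n arr1 arr2 _hdom hpre
  unfold Spec_solution
  exact solution_eq_main n arr1 arr2 hpre
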